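-- pv_equiv track=rewrite | github.com/bioinformatics-torvergata/RIG | scripts/prepare_new_rfam_release.py | pairedConstraint
-- ===== SOURCE A (Python) =====
-- def pairedConstraint(const):
--     n = 0
--     parenthesis = []
--     for c in const:
--         if c == "<":
--             n += 1
--             parenthesis.append(n)
--         elif c == ">":
--             parenthesis.append(n)
--             n -= 1
--         else:
--             parenthesis.append(0)
--     pairs = [0] * len(parenthesis)
--     for i, pi in enumerate(parenthesis):
--         for j, pj in enumerate(parenthesis):
--             if pi == pj and i != j and pi != 0:
--                 pairs[i] = j
--                 pairs[j] = i
--                 parenthesis[i] = 0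
--                 parenthesis[j] = 0
--                 break
--     return pairs
-- ===== SOURCE B (Python) =====
-- def pairedConstraint(const):
--     pairs = [0] * len(const)
--     n = 0
--     pending = {}
--     for i, c in enumerate(const):
--         if c == "<":
--             n += 1
--             d = n
--         elif c == ">":
--             d = n
--             n -= 1
--         else:
--             continue
--         if d == 0:
--             continue
--         j = pending.pop(d, None)
--         if j is None:
--             pending[d] = i
--         else:
--             pairs[i] = j
--             pairs[j] = i
--     return pairs
-- ===== Notes on version B (the rewrite author's own statement) =====
-- stated objective: faster
-- what changed: B replaces A's quadratic search (for every position, rescan the whole label list for the first equal nonzero depth label) by a single pass that pairs each bracket with the pending same-depth occurrence kept in a dictionary.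
import Mathlib
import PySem

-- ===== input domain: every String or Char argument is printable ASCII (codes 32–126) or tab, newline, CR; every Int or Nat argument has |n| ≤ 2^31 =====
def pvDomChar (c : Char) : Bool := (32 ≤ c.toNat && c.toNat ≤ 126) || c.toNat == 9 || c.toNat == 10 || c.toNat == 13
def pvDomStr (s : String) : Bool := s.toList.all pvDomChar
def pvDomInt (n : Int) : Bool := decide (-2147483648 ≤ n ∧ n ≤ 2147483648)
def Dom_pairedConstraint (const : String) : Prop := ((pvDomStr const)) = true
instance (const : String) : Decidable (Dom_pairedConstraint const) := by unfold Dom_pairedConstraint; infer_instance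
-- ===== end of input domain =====

-- B is a single stack-less dictionary pass (O(n)) replacing A's quadratic rescan; equal return value on every string.

-- ===== PORT A =====
-- inner loop: first j with parenthesis[j] == pi and j != i and pi != 0 (Python's enumerate scan with break)
def pvFindJ (par : List Int) (pi : Int) (i : Nat) : Option Nat :=
  (List.range par.length).find? (fun j => decide (par.getD j 0 = pi ∧ j ≠ i ∧ pi ≠ 0))

-- one iteration of A's outer loop (enumerate over the mutating list = read parenthesis[i] at step i)
def pvStepA (st : List Int × List Int) (i : Nat) : List Int × List Int :=
  match pvFindJ st.2 (st.2.getD i 0) i with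
  | some j => ((st.1.set i (j : Int)).set j (i : Int), (st.2.set i 0).set j 0)
  | none => st

def pairedConstraint (const : String) : List Int :=
  let st := const.toList.foldl
    (fun (st : Int × List Int) c =>
      if c = '<' then (st.1 + 1, st.2 ++ [st.1 + 1])
      else if c = '>' then (st.1 - 1, st.2 ++ [st.1])
      else (st.1, st.2 ++ [0])) (0, [])
  let par := st.2
  ((List.range par.length).foldl pvStepA (List.replicate par.length 0, par)).1

-- ===== PORT B =====
-- body after d is computed: skip depth 0, otherwise pair with the pending index of the same depth
def pvBodyB (pairs : List Int) (n : Int) (pending : PySem.Dict Int (Option Nat)) (d : Int)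
    (i : Nat) : List Int × Int × PySem.Dict Int (Option Nat) :=
  if d = 0 then (pairs, n, pending)
  else
    match pending.getD d none with
    | none => (pairs, n, pending.insert d (some i))
    | some j => ((pairs.set i (j : Int)).set j (i : Int), n, pending.insert d none)

def pvStepB (st : List Int × Int × PySem.Dict Int (Option Nat)) (ci : Char × Nat) :
    List Int × Int × PySem.Dict Int (Option Nat) :=
  if ci.1 = '<' then pvBodyB st.1 (st.2.1 + 1) st.2.2 (st.2.1 + 1) ci.2
  else if ci.1 = '>' then pvBodyB st.1 (st.2.1 - 1) st.2.2 st.2.1 ci.2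
  else st

def pairedConstraint_alt (const : String) : List Int :=
  let cs := const.toList
  (cs.zipIdx.foldl pvStepB (List.replicate cs.length 0, 0, PySem.Dict.empty)).1

-- ===== PRECONDITION & SPEC =====
def Spec_pairedConstraint (const : String) (out : List Int) : Prop := out = pairedConstraint_alt const
instance (const : String) (out : List Int) : Decidable (Spec_pairedConstraint const out) := by unfold Spec_pairedConstraint; infer_instance

-- ===== CLAIM (what is proved, stated in full; the proofs are below) =====
def Claim_equal_pairedConstraint : Prop := ∀ (const : String), Dom_pairedConstraint const → Spec_pairedConstraint const (pairedConstraint const)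

-- ===== LEMMAS AND PROOFS =====

-- depth-label list produced by A's first pass / B's running n
def pvLab : List Char → Int → List Int
  | [], _ => []
  | c :: cs, n =>
    if c = '<' then (n + 1) :: pvLab cs (n + 1)
    else if c = '>' then n :: pvLab cs (n - 1)
    else 0 :: pvLab cs n

-- running depth after consuming a char list
def pvNd : List Char → Int → Int
  | [], n => n
  | c :: cs, n => pvNd cs (if c = '<' then n + 1 else if c = '>' then n - 1 else n)

-- pending same-depth occurrence after t steps of the pairing process
def pvPend (L : List Int) : Nat → Int → Option Nat
  | 0 => fun _ => none
  | t + 1 =>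
    let d := L.getD t 0
    let p := pvPend L t
    if d = 0 then p
    else
      match p d with
      | some _ => fun d' => if d' = d then none else p d'
      | none => fun d' => if d' = d then some t else p d'

-- partner assignment after t steps of the pairing process
def pvPrF (L : List Int) : Nat → Nat → Option Nat
  | 0 => fun _ => none
  | t + 1 =>
    let d := L.getD t 0
    if d = 0 then pvPrF L t
    else
      match pvPend L t d with
      | some j => fun k => if k = t then some j else if k = j then some t else pvPrF L t k
      | none => pvPrF L t

def pvPr (L : List Int) (k : Nat) : Option Nat := pvPrF L L.length k

def pvFpr (L : List Int) (k : Nat) : Int :=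
  match pvPr L k with
  | some j => (j : Int)
  | none => 0

def pvGA (L : List Int) (t k : Nat) : Int :=
  match pvPr L k with
  | some j => if min k j < t then (j : Int) else 0
  | none => 0

def pvParf (L : List Int) (t k : Nat) : Int :=
  match pvPr L k with
  | some j => if min k j < t then 0 else L.getD k 0
  | none => L.getD k 0

def pvGB (L : List Int) (t k : Nat) : Int :=
  match pvPr L k with
  | some j => if max k j < t then (j : Int) else 0
  | none => 0


lemma pvPend_succ (L : List Int) (t : Nat) :
    pvPend L (t + 1) =
      (if L.getD t 0 = 0 then pvPend L t
       else
         match pvPend L t (L.getD t 0) with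
         | some _ => fun d' => if d' = L.getD t 0 then none else pvPend L t d'
         | none => fun d' => if d' = L.getD t 0 then some t else pvPend L t d') := rfl

lemma pvPrF_succ (L : List Int) (t : Nat) :
    pvPrF L (t + 1) =
      (if L.getD t 0 = 0 then pvPrF L t
       else
         match pvPend L t (L.getD t 0) with
         | some j => fun k => if k = t then some j else if k = j then some t else pvPrF L t k
         | none => pvPrF L t) := rfl

lemma pvPend_succ_zero (L : List Int) (t : Nat) (hd : L.getD t 0 = 0) :
    ∀ d, pvPend L (t + 1) d = pvPend L t d := by
  intro d; rw [pvPend_succ, if_pos hd]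

lemma pvPend_succ_some (L : List Int) (t : Nat) (j0 : Nat) (hd : L.getD t 0 ≠ 0)
    (hpend : pvPend L t (L.getD t 0) = some j0) :
    ∀ d, pvPend L (t + 1) d = if d = L.getD t 0 then none else pvPend L t d := by
  intro d; rw [pvPend_succ, if_neg hd, hpend]

lemma pvPend_succ_none (L : List Int) (t : Nat) (hd : L.getD t 0 ≠ 0)
    (hpend : pvPend L t (L.getD t 0) = none) :
    ∀ d, pvPend L (t + 1) d = if d = L.getD t 0 then some t else pvPend L t d := by
  intro d; rw [pvPend_succ, if_neg hd, hpend]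

lemma pvPrF_succ_zero (L : List Int) (t : Nat) (hd : L.getD t 0 = 0) :
    ∀ k, pvPrF L (t + 1) k = pvPrF L t k := by
  intro k; rw [pvPrF_succ, if_pos hd]

lemma pvPrF_succ_some (L : List Int) (t : Nat) (j0 : Nat) (hd : L.getD t 0 ≠ 0)
    (hpend : pvPend L t (L.getD t 0) = some j0) :
    ∀ k, pvPrF L (t + 1) k = if k = t then some j0 else if k = j0 then some t else pvPrF L t k := by
  intro k; rw [pvPrF_succ, if_neg hd, hpend]

lemma pvPrF_succ_none (L : List Int) (t : Nat) (hd : L.getD t 0 ≠ 0)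
    (hpend : pvPend L t (L.getD t 0) = none) :
    ∀ k, pvPrF L (t + 1) k = pvPrF L t k := by
  intro k; rw [pvPrF_succ, if_neg hd, hpend]

lemma pvLab_length (cs : List Char) : ∀ n, (pvLab cs n).length = cs.length := by
  induction cs with
  | nil => intro n; simp [pvLab]
  | cons c cs ih => intro n; by_cases h1 : c = '<' <;> by_cases h2 : c = '>' <;> simp [pvLab, h1, h2, ih]

lemma pvPhase1 (cs : List Char) : ∀ (n : Int) (acc : List Int),
    cs.foldl (fun (st : Int × List Int) c =>
      if c = '<' then (st.1 + 1, st.2 ++ [st.1 + 1])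
      else if c = '>' then (st.1 - 1, st.2 ++ [st.1])
      else (st.1, st.2 ++ [0])) (n, acc) = (pvNd cs n, acc ++ pvLab cs n) := by
  induction cs with
  | nil => intro n acc; simp [pvNd, pvLab]
  | cons c cs ih =>
    intro n acc
    by_cases h1 : c = '<'
    · simp [List.foldl_cons, h1, pvNd, pvLab, ih]
    · by_cases h2 : c = '>' <;> simp [List.foldl_cons, h1, h2, pvNd, pvLab, ih]

-- label/depth step characterisation
lemma pvLabStep (cs : List Char) : ∀ (n : Int) (t : Nat), t < cs.length →
    (pvLab cs n).getD t 0 =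
      (if cs.getD t ' ' = '<' then pvNd (cs.take t) n + 1
       else if cs.getD t ' ' = '>' then pvNd (cs.take t) n else 0)
    ∧ pvNd (cs.take (t + 1)) n =
      (if cs.getD t ' ' = '<' then pvNd (cs.take t) n + 1
       else if cs.getD t ' ' = '>' then pvNd (cs.take t) n - 1 else pvNd (cs.take t) n) := by
  induction cs with
  | nil => intro n t h; simp at h
  | cons c cs ih =>
    intro n t h
    cases t with
    | zero =>
      by_cases h1 : c = '<'
      · simp [pvLab, pvNd, h1]
      · by_cases h2 : c = '>' <;> simp [pvLab, pvNd, h1, h2]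
    | succ t =>
      have ht : t < cs.length := by simpa using h
      by_cases h1 : c = '<'
      · simpa [pvLab, pvNd, h1] using ih (n + 1) t ht
      · by_cases h2 : c = '>'
        · simpa [pvLab, pvNd, h1, h2] using ih (n - 1) t ht
        · simpa [pvLab, pvNd, h1, h2] using ih n t ht

-- the joint invariant of the pairing process
lemma pvInv (L : List Int) : ∀ t : Nat,
    (∀ k j, pvPrF L t k = some j →
      pvPrF L t j = some k ∧ L.getD j 0 = L.getD k 0 ∧ L.getD k 0 ≠ 0 ∧ k ≠ j ∧ k < t ∧ j < t)
    ∧ (∀ d j, pvPend L t d = some j → j < t ∧ L.getD j 0 = d ∧ d ≠ 0 ∧ pvPrF L t j = none)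
    ∧ (∀ k, k < t → L.getD k 0 ≠ 0 → pvPrF L t k = none → pvPend L t (L.getD k 0) = some k) := by
  intro t
  induction t with
  | zero =>
    refine ⟨fun k j h => by simp [pvPrF] at h, fun d j h => by simp [pvPend] at h,
      fun k hk => absurd hk (Nat.not_lt_zero k)⟩
  | succ t ih =>
    obtain ⟨ih1, ih2, ih3⟩ := ih
    have hself : pvPrF L t t = none := by
      cases h : pvPrF L t t with
      | none => rfl
      | some j => exact absurd (ih1 t j h).2.2.2.2.1 (lt_irrefl t)
    by_cases hd : L.getD t 0 = 0
    · refine ⟨?_, ?_, ?_⟩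
      · intro k j h
        rw [pvPrF_succ_zero L t hd] at h
        obtain ⟨a, b, c, d', e, f⟩ := ih1 k j h
        exact ⟨by rw [pvPrF_succ_zero L t hd]; exact a, b, c, d', by omega, by omega⟩
      · intro d j h
        rw [pvPend_succ_zero L t hd] at h
        obtain ⟨a, b, c, d'⟩ := ih2 d j h
        exact ⟨by omega, b, c, by rw [pvPrF_succ_zero L t hd]; exact d'⟩
      · intro k hk hne hpr
        rw [pvPrF_succ_zero L t hd] at hpr
        rw [pvPend_succ_zero L t hd]
        rcases Nat.lt_succ_iff_lt_or_eq.mp hk with h' | h'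
        · exact ih3 k h' hne hpr
        · subst h'; exact absurd hd hne
    · cases hpend : pvPend L t (L.getD t 0) with
      | none =>
        refine ⟨?_, ?_, ?_⟩
        · intro k j h
          rw [pvPrF_succ_none L t hd hpend] at h
          obtain ⟨a, b, c, d', e, f⟩ := ih1 k j h
          exact ⟨by rw [pvPrF_succ_none L t hd hpend]; exact a, b, c, d', by omega, by omega⟩
        · intro d j h
          rw [pvPend_succ_none L t hd hpend] at h
          by_cases hdd : d = L.getD t 0
          · rw [if_pos hdd] at h
            injection h with h
            subst h
            exact ⟨Nat.lt_succ_self t, hdd.symm, hdd ▸ hd, by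
              rw [pvPrF_succ_none L t hd hpend]; exact hself⟩
          · rw [if_neg hdd] at h
            obtain ⟨a, b, c, d'⟩ := ih2 d j h
            exact ⟨by omega, b, c, by rw [pvPrF_succ_none L t hd hpend]; exact d'⟩
        · intro k hk hne hpr
          rw [pvPrF_succ_none L t hd hpend] at hpr
          rw [pvPend_succ_none L t hd hpend]
          rcases Nat.lt_succ_iff_lt_or_eq.mp hk with h' | h'
          · have hp := ih3 k h' hne hpr
            by_cases hkk : L.getD k 0 = L.getD t 0
            · rw [hkk] at hp; rw [hp] at hpend; exact absurd hpend (by simp)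
            · rw [if_neg hkk]; exact hp
          · subst h'; rw [if_pos rfl]
      | some j0 =>
        obtain ⟨hj0t, hj0lab, hj0d, hj0pr⟩ := ih2 _ _ hpend
        have hj0ne : j0 ≠ t := by omega
        refine ⟨?_, ?_, ?_⟩
        · intro k j h
          rw [pvPrF_succ_some L t j0 hd hpend] at h
          rw [pvPrF_succ_some L t j0 hd hpend]
          by_cases hk : k = t
          · subst hk
            rw [if_pos rfl] at h
            injection h with h
            subst h
            rw [if_neg hj0ne, if_pos rfl]
            exact ⟨rfl, hj0lab, hd, by omega, by omega, by omega⟩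
          · by_cases hk2 : k = j0
            · subst hk2
              rw [if_neg hk, if_pos rfl] at h
              injection h with h
              subst h
              rw [if_pos rfl]
              exact ⟨rfl, hj0lab.symm, hj0lab ▸ hd, by omega, by omega, by omega⟩
            · rw [if_neg hk, if_neg hk2] at h
              obtain ⟨a, b, c, d', e, f⟩ := ih1 k j h
              have hjt : j ≠ t := fun he => by rw [he, hself] at a; exact absurd a (by simp)
              have hjj0 : j ≠ j0 := fun he => by rw [he, hj0pr] at a; exact absurd a (by simp)
              rw [if_neg hjt, if_neg hjj0]
              exact ⟨a, b, c, d', by omega, by omega⟩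
        · intro d j h
          rw [pvPend_succ_some L t j0 hd hpend] at h
          by_cases hdd : d = L.getD t 0
          · rw [if_pos hdd] at h; exact absurd h (by simp)
          · rw [if_neg hdd] at h
            obtain ⟨a, b, c, d'⟩ := ih2 d j h
            have hjt : j ≠ t := by omega
            have hjj0 : j ≠ j0 := fun he => by
              subst he; rw [b] at hj0lab; exact hdd (hj0lab ▸ rfl)
            rw [pvPrF_succ_some L t j0 hd hpend]
            rw [if_neg hjt, if_neg hjj0]
            exact ⟨by omega, b, c, d'⟩
        · intro k hk hne hpr
          rw [pvPrF_succ_some L t j0 hd hpend] at hpr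
          rw [pvPend_succ_some L t j0 hd hpend]
          by_cases hkt : k = t
          · rw [if_pos hkt] at hpr; exact absurd hpr (by simp)
          · by_cases hkj0 : k = j0
            · rw [if_neg hkt, if_pos hkj0] at hpr; exact absurd hpr (by simp)
            · rw [if_neg hkt, if_neg hkj0] at hpr
              have hklt : k < t := by omega
              have hp := ih3 k hklt hne hpr
              by_cases hkk : L.getD k 0 = L.getD t 0
              · rw [hkk, hpend] at hp
                injection hp with hp
                exact absurd hp.symm hkj0
              · rw [if_neg hkk]; exact hp

lemma pvPrF_mono_succ (L : List Int) (s k j : Nat) (h : pvPrF L s k = some j) :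
    pvPrF L (s + 1) k = some j := by
  obtain ⟨ih1, ih2, ih3⟩ := pvInv L s
  have hself : pvPrF L s s = none := by
    cases hh : pvPrF L s s with
    | none => rfl
    | some x => exact absurd (ih1 s x hh).2.2.2.2.1 (lt_irrefl s)
  by_cases hd : L.getD s 0 = 0
  · rw [pvPrF_succ_zero L s hd]; exact h
  · cases hpend : pvPend L s (L.getD s 0) with
    | none => rw [pvPrF_succ_none L s hd hpend]; exact h
    | some j0 =>
      have hj0pr := (ih2 _ _ hpend).2.2.2
      have hkt : k ≠ s := fun e => by rw [e, hself] at h; exact absurd h (by simp)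
      have hkj0 : k ≠ j0 := fun e => by rw [e, hj0pr] at h; exact absurd h (by simp)
      rw [pvPrF_succ_some L s j0 hd hpend, if_neg hkt, if_neg hkj0]; exact h

lemma pvPrF_le (L : List Int) : ∀ {t s k j}, t ≤ s → pvPrF L t k = some j → pvPrF L s k = some j := by
  intro t s k j hts h
  obtain ⟨n, rfl⟩ := Nat.exists_eq_add_of_le hts
  clear hts
  induction n with
  | zero => exact h
  | succ n ih => exact pvPrF_mono_succ L (t + n) k j ih

-- a pair (k,j) with k < j is created at step j, with k pending just before
lemma pvCreated (L : List Int) : ∀ s k j, pvPrF L s k = some j → k < j →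
    j < s ∧ pvPend L j (L.getD k 0) = some k := by
  intro s
  induction s with
  | zero => intro k j h; exact absurd h (by simp [pvPrF])
  | succ s ih =>
    intro k j h hkj
    obtain ⟨ih1, ih2, ih3⟩ := pvInv L s
    by_cases hd : L.getD s 0 = 0
    · rw [pvPrF_succ_zero L s hd] at h
      obtain ⟨a, b⟩ := ih k j h hkj
      exact ⟨by omega, b⟩
    · cases hpend : pvPend L s (L.getD s 0) with
      | none =>
        rw [pvPrF_succ_none L s hd hpend] at h
        obtain ⟨a, b⟩ := ih k j h hkj
        exact ⟨by omega, b⟩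
      | some j0 =>
        obtain ⟨hj0s, hj0lab, hj0d, hj0pr⟩ := ih2 _ _ hpend
        rw [pvPrF_succ_some L s j0 hd hpend] at h
        by_cases hks : k = s
        · rw [if_pos hks] at h
          injection h with h
          exact (by omega : False).elim
        · by_cases hkj0 : k = j0
          · rw [if_neg hks, if_pos hkj0] at h
            injection h with h
            subst h
            refine ⟨Nat.lt_succ_self s, ?_⟩
            rw [hkj0, hj0lab]
            exact hkj0 ▸ hpend
          · rw [if_neg hks, if_neg hkj0] at h
            obtain ⟨a, b⟩ := ih k j h hkj
            exact ⟨by omega, b⟩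

lemma pvPersist (L : List Int) : ∀ s d k, pvPend L s d = some k →
    ∀ s', k < s' → s' ≤ s → pvPend L s' d = some k := by
  intro s
  induction s with
  | zero => intro d k h; exact absurd h (by simp [pvPend])
  | succ s ih =>
    intro d k h s' h1 h2
    by_cases hs' : s' = s + 1
    · subst hs'; exact h
    · have h2' : s' ≤ s := by omega
      by_cases hd : L.getD s 0 = 0
      · rw [pvPend_succ_zero L s hd] at h; exact ih d k h s' h1 h2'
      · cases hpend : pvPend L s (L.getD s 0) with
        | some j0 =>
          rw [pvPend_succ_some L s j0 hd hpend] at h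
          by_cases hdd : d = L.getD s 0
          · rw [if_pos hdd] at h; exact absurd h (by simp)
          · rw [if_neg hdd] at h; exact ih d k h s' h1 h2'
        | none =>
          rw [pvPend_succ_none L s hd hpend] at h
          by_cases hdd : d = L.getD s 0
          · rw [if_pos hdd] at h
            injection h with h
            exact (by omega : False).elim
          · rw [if_neg hdd] at h; exact ih d k h s' h1 h2'

-- every other same-label index below an open pair's closer is already consumed before the opener
lemma pvF1 (L : List Int) (N t j : Nat) (h : pvPrF L N t = some j) (htj : t < j)
    (k : Nat) (hk1 : k ≠ t) (hk2 : k < j) (hlk : L.getD k 0 = L.getD t 0) :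
    ∃ j', pvPrF L N k = some j' ∧ min k j' < t := by
  obtain ⟨i1, i2, i3⟩ := pvInv L N
  have hsym := i1 t j h
  have hdne : L.getD t 0 ≠ 0 := hsym.2.2.1
  obtain ⟨hjN, hcr⟩ := pvCreated L N t j h htj
  cases hk : pvPrF L N k with
  | none =>
    exfalso
    have hkN : k < N := lt_trans hk2 hjN
    have h3 := i3 k hkN (by rw [hlk]; exact hdne) hk
    rw [hlk] at h3
    have hpj := pvPersist L N (L.getD t 0) k h3 j hk2 (le_of_lt hjN)
    rw [hcr] at hpj
    injection hpj with hpj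
    exact hk1 hpj.symm
  | some j' =>
    refine ⟨j', rfl, ?_⟩
    by_contra hmin
    have hsk := i1 k j' hk
    have hj't : j' ≠ t := by
      intro e
      have hx := hsk.1
      rw [e, h] at hx
      injection hx with hx
      omega
    have htk : t < k := by omega
    have htj'2 : t < j' := by omega
    have hperT : ∀ s', t < s' → s' ≤ j → pvPend L s' (L.getD t 0) = some t :=
      fun s' a b => pvPersist L j (L.getD t 0) t hcr s' a b
    rcases lt_or_gt_of_ne hsk.2.2.2.1 with hkj' | hj'k
    · obtain ⟨hj'N, hcr2⟩ := pvCreated L N k j' hk hkj'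
      rw [hlk] at hcr2
      by_cases hbj : j' ≤ j
      · have hx := hperT j' htj'2 hbj
        rw [hcr2] at hx
        injection hx with hx
        omega
      · have hx1 := pvPersist L j' (L.getD t 0) k hcr2 (k + 1) (Nat.lt_succ_self k) (by omega)
        have hx2 := hperT (k + 1) (by omega) (by omega)
        rw [hx1] at hx2
        injection hx2 with hx2
        omega
    · obtain ⟨hkN2, hcr2⟩ := pvCreated L N j' k hsk.1 hj'k
      rw [hsk.2.1, hlk] at hcr2
      have hx := hperT k htk (le_of_lt hk2)
      rw [hcr2] at hx
      injection hx with hx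
      omega

-- same for an unmatched nonzero position
lemma pvF2 (L : List Int) (N t : Nat) (hN : t < N) (h : pvPrF L N t = none)
    (hd : L.getD t 0 ≠ 0) (k : Nat) (hk1 : k ≠ t) (hkN : k < N)
    (hlk : L.getD k 0 = L.getD t 0) :
    ∃ j', pvPrF L N k = some j' ∧ min k j' < t := by
  obtain ⟨i1, i2, i3⟩ := pvInv L N
  have hp := i3 t hN hd h
  have hperT : ∀ s', t < s' → s' ≤ N → pvPend L s' (L.getD t 0) = some t :=
    fun s' a b => pvPersist L N (L.getD t 0) t hp s' a b
  cases hk : pvPrF L N k with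
  | none =>
    exfalso
    have h3 := i3 k hkN (by rw [hlk]; exact hd) hk
    rw [hlk, hp] at h3
    injection h3 with h3
    exact hk1 h3.symm
  | some j' =>
    refine ⟨j', rfl, ?_⟩
    by_contra hmin
    have hsk := i1 k j' hk
    have hj't : j' ≠ t := by
      intro e
      have hx := hsk.1
      rw [e, h] at hx
      exact absurd hx (by simp)
    have htk : t < k := by omega
    have htj'2 : t < j' := by omega
    rcases lt_or_gt_of_ne hsk.2.2.2.1 with hkj' | hj'k
    · obtain ⟨hj'N, hcr2⟩ := pvCreated L N k j' hk hkj'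
      rw [hlk] at hcr2
      have hx := hperT j' htj'2 (le_of_lt hj'N)
      rw [hcr2] at hx
      injection hx with hx
      omega
    · obtain ⟨hkN2, hcr2⟩ := pvCreated L N j' k hsk.1 hj'k
      rw [hsk.2.1, hlk] at hcr2
      have hx := hperT k htk (le_of_lt hkN2)
      rw [hcr2] at hx
      injection hx with hx
      omega


lemma pvPr_inv (L : List Int) : ∀ k j, pvPr L k = some j →
    pvPr L j = some k ∧ L.getD j 0 = L.getD k 0 ∧ L.getD k 0 ≠ 0 ∧ k ≠ j ∧
      k < L.length ∧ j < L.length :=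
  (pvInv L L.length).1

lemma pvGA_eq_none (L : List Int) (t k : Nat) (h : pvPr L k = none) : pvGA L t k = 0 := by
  simp only [pvGA, h]

lemma pvGA_eq_some (L : List Int) (t k j : Nat) (h : pvPr L k = some j) :
    pvGA L t k = if min k j < t then (j : Int) else 0 := by
  simp only [pvGA, h]

lemma pvParf_eq_none (L : List Int) (t k : Nat) (h : pvPr L k = none) :
    pvParf L t k = L.getD k 0 := by
  simp only [pvParf, h]

lemma pvParf_eq_some (L : List Int) (t k j : Nat) (h : pvPr L k = some j) :
    pvParf L t k = if min k j < t then 0 else L.getD k 0 := by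
  simp only [pvParf, h]

lemma pvGB_eq_none (L : List Int) (t k : Nat) (h : pvPr L k = none) : pvGB L t k = 0 := by
  simp only [pvGB, h]

lemma pvGB_eq_some (L : List Int) (t k j : Nat) (h : pvPr L k = some j) :
    pvGB L t k = if max k j < t then (j : Int) else 0 := by
  simp only [pvGB, h]

lemma pvGA_zero (L : List Int) (k : Nat) : pvGA L 0 k = 0 := by
  cases h : pvPr L k with
  | none => rw [pvGA_eq_none L 0 k h]
  | some j => rw [pvGA_eq_some L 0 k j h, if_neg (by omega)]

lemma pvParf_zero (L : List Int) (k : Nat) : pvParf L 0 k = L.getD k 0 := by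
  cases h : pvPr L k with
  | none => rw [pvParf_eq_none L 0 k h]
  | some j => rw [pvParf_eq_some L 0 k j h, if_neg (by omega)]

lemma pvGB_zero (L : List Int) (k : Nat) : pvGB L 0 k = 0 := by
  cases h : pvPr L k with
  | none => rw [pvGB_eq_none L 0 k h]
  | some j => rw [pvGB_eq_some L 0 k j h, if_neg (by omega)]

lemma pvGetD_map_range (f : Nat → Int) (m k : Nat) (h : k < m) :
    ((List.range m).map f).getD k 0 = f k := by
  simp [List.getD_eq_getElem?_getD, List.getElem?_map, List.getElem?_range, h]

lemma pvSet_map_range (f : Nat → Int) (m i : Nat) (v : Int) (h : i < m) :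
    ((List.range m).map f).set i v = (List.range m).map fun k => if k = i then v else f k := by
  refine List.ext_getElem (by simp) ?_
  intro n h1 h2
  simp only [List.getElem_set, List.getElem_map, List.getElem_range]
  rcases eq_or_ne i n with e | e
  · subst e; simp
  · rw [if_neg e, if_neg (Ne.symm e)]

lemma pvMapCongr (f g : Nat → Int) (m : Nat) (h : ∀ k, k < m → f k = g k) :
    (List.range m).map f = (List.range m).map g :=
  List.map_congr_left fun k hk => h k (List.mem_range.mp hk)

lemma pvMapGetD (L : List Int) : (List.range L.length).map (fun k => L.getD k 0) = L := by
  refine List.ext_getElem (by simp) ?_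
  intro n h1 h2
  simp [List.getD_eq_getElem?_getD, List.getElem?_eq_getElem h2]

lemma pvMapZero (m : Nat) : (List.range m).map (fun _ => (0 : Int)) = List.replicate m 0 := by
  refine List.ext_getElem (by simp) ?_
  intro n h1 h2
  simp

lemma pvFindRangeNone (p : Nat → Bool) (m : Nat) (h : ∀ k, k < m → ¬ p k = true) :
    (List.range m).find? p = none := by
  rw [List.find?_eq_none]
  intro x hx
  exact h x (List.mem_range.mp hx)

lemma pvFindRangeSome (p : Nat → Bool) (j : Nat) (pj : p j = true)
    (hbelow : ∀ k, k < j → ¬ p k = true) :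
    ∀ m, j < m → (List.range m).find? p = some j := by
  intro m
  induction m with
  | zero => intro h; exact absurd h (Nat.not_lt_zero j)
  | succ m ih =>
    intro hj
    rw [List.range_succ, List.find?_append]
    rcases Nat.lt_succ_iff_lt_or_eq.mp hj with h | h
    · rw [ih h]; rfl
    · subst h
      rw [pvFindRangeNone p j hbelow]
      simp [List.find?, pj]

lemma pvParfNe (L : List Int) (t k : Nat) (hkm : k < L.length) (hkt : k ≠ t)
    (hd : L.getD t 0 ≠ 0)
    (hex : L.getD k 0 = L.getD t 0 → ∃ j', pvPr L k = some j' ∧ min k j' < t) :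
    pvParf L t k ≠ L.getD t 0 := by
  cases hk : pvPr L k with
  | none =>
    rw [pvParf_eq_none L t k hk]
    intro e
    obtain ⟨j', hj', -⟩ := hex e
    rw [hk] at hj'
    exact absurd hj' (by simp)
  | some j' =>
    rw [pvParf_eq_some L t k j' hk]
    by_cases hmin : min k j' < t
    · rw [if_pos hmin]; exact fun e => hd e.symm
    · rw [if_neg hmin]
      intro e
      obtain ⟨j'', hj'', hm⟩ := hex e
      rw [hk] at hj''
      injection hj'' with hj''
      exact hmin (hj'' ▸ hm)

lemma pvGA_frozen (L : List Int) (t : Nat) (hfr : ∀ j, pvPr L t = some j → j < t) :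
    ∀ k, pvGA L (t + 1) k = pvGA L t k ∧ pvParf L (t + 1) k = pvParf L t k := by
  intro k
  cases hk : pvPr L k with
  | none =>
    rw [pvGA_eq_none L (t+1) k hk, pvGA_eq_none L t k hk,
        pvParf_eq_none L (t+1) k hk, pvParf_eq_none L t k hk]
    exact ⟨rfl, rfl⟩
  | some j' =>
    have hne : min k j' ≠ t := by
      intro e
      rcases (by omega : k = t ∨ j' = t) with h1 | h1
      · rw [h1] at hk; have := hfr j' hk; omega
      · rw [h1] at hk
        have hs := (pvPr_inv L k t hk).1
        have := hfr k hs
        omega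
    have hiff : (min k j' < t + 1) ↔ min k j' < t := by omega
    rw [pvGA_eq_some L (t+1) k j' hk, pvGA_eq_some L t k j' hk,
        pvParf_eq_some L (t+1) k j' hk, pvParf_eq_some L t k j' hk]
    simp [hiff]

lemma pvGA_active (L : List Int) (t j : Nat) (h : pvPr L t = some j) (htj : t < j) : ∀ k,
    pvGA L (t + 1) k = (if k = t then (j : Int) else if k = j then (t : Int) else pvGA L t k)
    ∧ pvParf L (t + 1) k = (if k = t then 0 else if k = j then 0 else pvParf L t k) := by
  have hin := pvPr_inv L t j h
  intro k
  by_cases hkt : k = t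
  · subst hkt
    have hmin : min k j = k := by omega
    simp [pvGA_eq_some L (k+1) k j h, pvParf_eq_some L (k+1) k j h, hmin]
  · by_cases hkj : k = j
    · subst hkj
      have hmin : min k t = t := by omega
      simp [pvGA_eq_some L (t+1) k t hin.1, pvParf_eq_some L (t+1) k t hin.1, hmin, hkt]
    · cases hk : pvPr L k with
      | none =>
        simp [pvGA_eq_none L (t+1) k hk, pvGA_eq_none L t k hk,
              pvParf_eq_none L (t+1) k hk, pvParf_eq_none L t k hk, hkt, hkj]
      | some j' =>
        have hne : min k j' ≠ t := by
          intro e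
          rcases (by omega : k = t ∨ j' = t) with h1 | h1
          · exact hkt h1
          · rw [h1] at hk
            have hx := (pvPr_inv L k t hk).1
            rw [h] at hx
            injection hx with hx
            exact hkj hx.symm
        have hiff : (min k j' < t + 1) ↔ min k j' < t := by omega
        simp [pvGA_eq_some L (t+1) k j' hk, pvGA_eq_some L t k j' hk,
              pvParf_eq_some L (t+1) k j' hk, pvParf_eq_some L t k j' hk, hiff, hkt, hkj]

lemma pvGB_frozen (L : List Int) (t : Nat)
    (hcase : L.getD t 0 = 0 ∨ pvPend L t (L.getD t 0) = none) :
    ∀ k, pvGB L (t + 1) k = pvGB L t k := by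
  intro k
  cases hk : pvPr L k with
  | none => rw [pvGB_eq_none L (t+1) k hk, pvGB_eq_none L t k hk]
  | some j' =>
    have hne : max k j' ≠ t := by
      intro e
      rcases (by omega : k = t ∨ j' = t) with h1 | h1
      · rw [h1] at hk
        have hin := pvPr_inv L t j' hk
        have hj't : j' < t := by omega
        obtain ⟨-, hcr⟩ := pvCreated L L.length j' t hin.1 hj't
        rw [hin.2.1] at hcr
        rcases hcase with hz | hn
        · exact hin.2.2.1 hz
        · rw [hn] at hcr; exact absurd hcr (by simp)
      · rw [h1] at hk
        have hin := pvPr_inv L k t hk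
        have hkt : k < t := by omega
        obtain ⟨-, hcr⟩ := pvCreated L L.length k t hk hkt
        rw [← hin.2.1] at hcr
        rcases hcase with hz | hn
        · exact hin.2.2.1 (by rw [← hin.2.1]; exact hz)
        · rw [hn] at hcr; exact absurd hcr (by simp)
    have hiff : (max k j' < t + 1) ↔ max k j' < t := by omega
    rw [pvGB_eq_some L (t+1) k j' hk, pvGB_eq_some L t k j' hk]
    simp only [hiff]

lemma pvGB_active (L : List Int) (t j0 : Nat) (hN : t < L.length) (hd : L.getD t 0 ≠ 0)
    (hpend : pvPend L t (L.getD t 0) = some j0) :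
    pvPr L t = some j0 ∧ j0 < t ∧
      ∀ k, pvGB L (t + 1) k =
        (if k = t then (j0 : Int) else if k = j0 then (t : Int) else pvGB L t k) := by
  have hj0 := (pvInv L t).2.1 _ _ hpend
  have hstep : pvPrF L (t + 1) t = some j0 := by
    rw [pvPrF_succ_some L t j0 hd hpend, if_pos rfl]
  have hpr : pvPr L t = some j0 := pvPrF_le L (by omega) hstep
  have hin := pvPr_inv L t j0 hpr
  refine ⟨hpr, hj0.1, ?_⟩
  intro k
  by_cases hkt : k = t
  · subst hkt
    have hmax : max k j0 = k := by omega
    simp [pvGB_eq_some L (k+1) k j0 hpr, hmax]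
  · by_cases hkj : k = j0
    · subst hkj
      have hmax : max k t = t := by omega
      simp [pvGB_eq_some L (t+1) k t hin.1, hmax, hkt]
    · cases hk : pvPr L k with
      | none => simp [pvGB_eq_none L (t+1) k hk, pvGB_eq_none L t k hk, hkt, hkj]
      | some j' =>
        have hne : max k j' ≠ t := by
          intro e
          rcases (by omega : k = t ∨ j' = t) with h1 | h1
          · exact hkt h1
          · rw [h1] at hk
            have hx := (pvPr_inv L k t hk).1
            rw [hpr] at hx
            injection hx with hx
            exact hkj hx.symm
        have hiff : (max k j' < t + 1) ↔ max k j' < t := by omega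
        simp [pvGB_eq_some L (t+1) k j' hk, pvGB_eq_some L t k j' hk, hiff, hkt, hkj]

lemma pvFindJ_none (L : List Int) (t : Nat) (ht : t < L.length)
    (hskip : ∀ j, pvPr L t = some j → j < t) :
    pvFindJ ((List.range L.length).map (pvParf L t)) (pvParf L t t) t = none := by
  unfold pvFindJ
  have hlen : ((List.range L.length).map (pvParf L t)).length = L.length := by simp
  rw [hlen]
  apply pvFindRangeNone
  intro k hk
  simp only [decide_eq_true_eq]
  rintro ⟨e1, e2, e3⟩
  rw [pvGetD_map_range (pvParf L t) L.length k hk] at e1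
  cases hprt : pvPr L t with
  | some j =>
    have hjt : j < t := hskip j hprt
    have h0 : pvParf L t t = 0 := by
      rw [pvParf_eq_some L t t j hprt, if_pos (by omega)]
    rw [h0] at e3
    exact e3 rfl
  | none =>
    by_cases hd : L.getD t 0 = 0
    · have h0 : pvParf L t t = 0 := by rw [pvParf_eq_none L t t hprt, hd]
      rw [h0] at e3
      exact e3 rfl
    · have hparf : pvParf L t t = L.getD t 0 := pvParf_eq_none L t t hprt
      rw [hparf] at e1
      refine pvParfNe L t k hk e2 hd ?_ e1
      intro hlab
      exact pvF2 L L.length t ht hprt hd k e2 hk hlab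

lemma pvFindJ_some (L : List Int) (t j : Nat) (ht : t < L.length)
    (hprt : pvPr L t = some j) (htj : t < j) :
    pvFindJ ((List.range L.length).map (pvParf L t)) (pvParf L t t) t = some j := by
  have hin := pvPr_inv L t j hprt
  have hd : L.getD t 0 ≠ 0 := hin.2.2.1
  have hparf : pvParf L t t = L.getD t 0 := by
    rw [pvParf_eq_some L t t j hprt, if_neg (by omega)]
  unfold pvFindJ
  have hlen : ((List.range L.length).map (pvParf L t)).length = L.length := by simp
  rw [hlen]
  refine pvFindRangeSome _ j ?_ ?_ L.length hin.2.2.2.2.2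
  · simp only [decide_eq_true_eq]
    refine ⟨?_, by omega, by rw [hparf]; exact hd⟩
    rw [pvGetD_map_range (pvParf L t) L.length j hin.2.2.2.2.2,
        pvParf_eq_some L t j t hin.1, if_neg (by omega), hparf]
    exact hin.2.1
  · intro k hkj
    simp only [decide_eq_true_eq]
    rintro ⟨e1, e2, e3⟩
    have hkm : k < L.length := by omega
    rw [pvGetD_map_range (pvParf L t) L.length k hkm, hparf] at e1
    refine pvParfNe L t k hkm e2 hd ?_ e1
    intro hlab
    exact pvF1 L L.length t j hprt htj k e2 hkj hlab

-- A's second loop realises the pairing process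
lemma pvAInv (L : List Int) : ∀ t, t ≤ L.length →
    (List.range t).foldl pvStepA (List.replicate L.length 0, L) =
      ((List.range L.length).map (pvGA L t), (List.range L.length).map (pvParf L t)) := by
  intro t
  induction t with
  | zero =>
    intro _
    rw [List.range_zero, List.foldl_nil, Prod.mk.injEq]
    constructor
    · rw [pvMapCongr (pvGA L 0) (fun _ => (0 : Int)) L.length (fun k _ => pvGA_zero L k),
          pvMapZero]
    · rw [pvMapCongr (pvParf L 0) (fun k => L.getD k 0) L.length (fun k _ => pvParf_zero L k),
          pvMapGetD]
  | succ t ih =>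
    intro ht
    have ht' : t < L.length := by omega
    rw [List.range_succ, List.foldl_append, ih (by omega), List.foldl_cons, List.foldl_nil]
    simp only [pvStepA]
    rw [pvGetD_map_range (pvParf L t) L.length t ht']
    cases hprt : pvPr L t with
    | none =>
      have hfr : ∀ j, pvPr L t = some j → j < t := by
        intro j hj; rw [hprt] at hj; exact absurd hj (by simp)
      rw [pvFindJ_none L t ht' hfr]
      show ((List.range L.length).map (pvGA L t), (List.range L.length).map (pvParf L t)) = _
      rw [Prod.mk.injEq]
      exact ⟨pvMapCongr _ _ _ (fun k _ => ((pvGA_frozen L t hfr k).1).symm),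
             pvMapCongr _ _ _ (fun k _ => ((pvGA_frozen L t hfr k).2).symm)⟩
    | some j =>
      have hin := pvPr_inv L t j hprt
      rcases lt_or_gt_of_ne hin.2.2.2.1 with htj | hjt
      · rw [pvFindJ_some L t j ht' hprt htj]
        show ((((List.range L.length).map (pvGA L t)).set t (j : Int)).set j (t : Int),
              (((List.range L.length).map (pvParf L t)).set t 0).set j 0) = _
        have hjm : j < L.length := hin.2.2.2.2.2
        have hact := pvGA_active L t j hprt htj
        rw [pvSet_map_range (pvGA L t) L.length t (j : Int) ht']
        rw [pvSet_map_range _ L.length j (t : Int) hjm]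
        rw [pvSet_map_range (pvParf L t) L.length t 0 ht']
        rw [pvSet_map_range _ L.length j 0 hjm]
        rw [Prod.mk.injEq]
        constructor
        · apply pvMapCongr
          intro k hk
          rw [(hact k).1]
          by_cases hkt : k = t
          · have hkj : k ≠ j := by omega
            rw [if_neg hkj, if_pos hkt, if_pos hkt]
          · by_cases hkj : k = j
            · rw [if_pos hkj, if_neg hkt, if_pos hkj]
            · rw [if_neg hkj, if_neg hkt, if_neg hkt, if_neg hkj]
        · apply pvMapCongr
          intro k hk
          rw [(hact k).2]
          by_cases hkt : k = t
          · have hkj : k ≠ j := by omega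
            rw [if_neg hkj, if_pos hkt, if_pos hkt]
          · by_cases hkj : k = j
            · rw [if_pos hkj, if_neg hkt, if_pos hkj]
            · rw [if_neg hkj, if_neg hkt, if_neg hkt, if_neg hkj]
      · have hfr : ∀ j', pvPr L t = some j' → j' < t := by
          intro j' hj'; rw [hprt] at hj'; injection hj' with e; omega
        rw [pvFindJ_none L t ht' hfr]
        show ((List.range L.length).map (pvGA L t), (List.range L.length).map (pvParf L t)) = _
        rw [Prod.mk.injEq]
        exact ⟨pvMapCongr _ _ _ (fun k _ => ((pvGA_frozen L t hfr k).1).symm),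
               pvMapCongr _ _ _ (fun k _ => ((pvGA_frozen L t hfr k).2).symm)⟩


lemma pvStepB_lt (st : List Int × Int × PySem.Dict Int (Option Nat)) (i : Nat) (c : Char)
    (h : c = '<') : pvStepB st (c, i) = pvBodyB st.1 (st.2.1 + 1) st.2.2 (st.2.1 + 1) i := by
  simp [pvStepB, h]

lemma pvStepB_gt (st : List Int × Int × PySem.Dict Int (Option Nat)) (i : Nat) (c : Char)
    (h : c = '>') : pvStepB st (c, i) = pvBodyB st.1 (st.2.1 - 1) st.2.2 st.2.1 i := by
  simp [pvStepB, h]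

lemma pvStepB_other (st : List Int × Int × PySem.Dict Int (Option Nat)) (i : Nat) (c : Char)
    (h1 : c ≠ '<') (h2 : c ≠ '>') : pvStepB st (c, i) = st := by
  simp [pvStepB, h1, h2]

lemma pvBody_main (cs : List Char) (t : Nat) (ht : t < cs.length) (n' : Int)
    (pairs : List Int) (pend : PySem.Dict Int (Option Nat))
    (hpairs : pairs = (List.range cs.length).map (pvGB (pvLab cs 0) t))
    (hpend : ∀ d, pend.getD d none = pvPend (pvLab cs 0) t d) :
    (pvBodyB pairs n' pend ((pvLab cs 0).getD t 0) t).1 =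
        (List.range cs.length).map (pvGB (pvLab cs 0) (t + 1))
    ∧ (pvBodyB pairs n' pend ((pvLab cs 0).getD t 0) t).2.1 = n'
    ∧ ∀ d', ((pvBodyB pairs n' pend ((pvLab cs 0).getD t 0) t).2.2).getD d' none =
        pvPend (pvLab cs 0) (t + 1) d' := by
  have hLlen : (pvLab cs 0).length = cs.length := pvLab_length cs 0
  unfold pvBodyB
  by_cases hd : (pvLab cs 0).getD t 0 = 0
  · rw [if_pos hd]
    refine ⟨?_, rfl, ?_⟩
    · show pairs = _
      rw [hpairs]
      exact pvMapCongr _ _ _ (fun k _ => ((pvGB_frozen (pvLab cs 0) t (Or.inl hd)) k).symm)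
    · intro d'
      show pend.getD d' none = _
      rw [pvPend_succ_zero (pvLab cs 0) t hd d']
      exact hpend d'
  · rw [if_neg hd, hpend ((pvLab cs 0).getD t 0)]
    cases hpd : pvPend (pvLab cs 0) t ((pvLab cs 0).getD t 0) with
    | none =>
      refine ⟨?_, rfl, ?_⟩
      · show pairs = _
        rw [hpairs]
        exact pvMapCongr _ _ _ (fun k _ => ((pvGB_frozen (pvLab cs 0) t (Or.inr hpd)) k).symm)
      · intro d'
        show (pend.insert ((pvLab cs 0).getD t 0) (some t)).getD d' none = _
        rw [PySem.Dict.getD_insert, pvPend_succ_none (pvLab cs 0) t hd hpd d']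
        by_cases e : d' = (pvLab cs 0).getD t 0
        · rw [if_pos e, if_pos e]
        · rw [if_neg e, if_neg e]; exact hpend d'
    | some j0 =>
      obtain ⟨hpr, hj0t, hupd⟩ := pvGB_active (pvLab cs 0) t j0 (by omega) hd hpd
      refine ⟨?_, rfl, ?_⟩
      · show ((pairs.set t (j0 : Int)).set j0 (t : Int)) = _
        rw [hpairs]
        have hj0m : j0 < cs.length := by omega
        rw [pvSet_map_range (pvGB (pvLab cs 0) t) cs.length t (j0 : Int) ht]
        rw [pvSet_map_range _ cs.length j0 (t : Int) hj0m]
        apply pvMapCongr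
        intro k hk
        rw [hupd k]
        by_cases hkt : k = t
        · have hkj : k ≠ j0 := by omega
          rw [if_neg hkj, if_pos hkt, if_pos hkt]
        · by_cases hkj : k = j0
          · rw [if_pos hkj, if_neg hkt, if_pos hkj]
          · rw [if_neg hkj, if_neg hkt, if_neg hkt, if_neg hkj]
      · intro d'
        show (pend.insert ((pvLab cs 0).getD t 0) none).getD d' none = _
        rw [PySem.Dict.getD_insert, pvPend_succ_some (pvLab cs 0) t j0 hd hpd d']
        by_cases e : d' = (pvLab cs 0).getD t 0
        · rw [if_pos e, if_pos e]
        · rw [if_neg e, if_neg e]; exact hpend d'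

-- B's single pass realises the pairing process
lemma pvBInv (cs : List Char) : ∀ t, t ≤ cs.length →
    ((cs.zipIdx.take t).foldl pvStepB (List.replicate cs.length 0, 0, PySem.Dict.empty)).1 =
        (List.range cs.length).map (pvGB (pvLab cs 0) t)
    ∧ ((cs.zipIdx.take t).foldl pvStepB (List.replicate cs.length 0, 0, PySem.Dict.empty)).2.1 =
        pvNd (cs.take t) 0
    ∧ ∀ d, (((cs.zipIdx.take t).foldl pvStepB (List.replicate cs.length 0, 0, PySem.Dict.empty)).2.2).getD d none =
        pvPend (pvLab cs 0) t d := by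
  intro t
  induction t with
  | zero =>
    intro _
    rw [List.take_zero, List.foldl_nil]
    refine ⟨?_, rfl, ?_⟩
    · show List.replicate cs.length (0 : Int) = _
      rw [pvMapCongr (pvGB (pvLab cs 0) 0) (fun _ => (0 : Int)) cs.length
            (fun k _ => pvGB_zero (pvLab cs 0) k), pvMapZero]
    · intro d
      show (PySem.Dict.empty : PySem.Dict Int (Option Nat)).getD d none = _
      rw [PySem.Dict.getD_empty]
      rfl
  | succ t ih =>
    intro ht
    have ht' : t < cs.length := by omega
    obtain ⟨ih1, ih2, ih3⟩ := ih (by omega)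
    have hidx : cs.zipIdx[t]? = some (cs[t], t) := by
      simp [List.getElem?_zipIdx, List.getElem?_eq_getElem ht']
    have htake : cs.zipIdx.take (t + 1) = cs.zipIdx.take t ++ [(cs[t], t)] := by
      rw [List.take_add_one, hidx]
      rfl
    rw [htake, List.foldl_append, List.foldl_cons, List.foldl_nil]
    have hlab := pvLabStep cs 0 t ht'
    have hgetd : cs.getD t ' ' = cs[t] := by
      rw [List.getD_eq_getElem?_getD, List.getElem?_eq_getElem ht']
      rfl
    rw [hgetd] at hlab
    obtain ⟨hl1, hl2⟩ := hlab
    by_cases hc1 : cs[t] = '<'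
    · rw [if_pos hc1] at hl1 hl2
      rw [pvStepB_lt _ t (cs[t]) hc1, ih2, ← hl1]
      have hmain := pvBody_main cs t ht' ((pvLab cs 0).getD t 0) _ _ ih1 ih3
      refine ⟨hmain.1, ?_, hmain.2.2⟩
      rw [hmain.2.1, hl2]
      exact hl1
    · by_cases hc2 : cs[t] = '>'
      · rw [if_neg hc1, if_pos hc2] at hl1 hl2
        rw [pvStepB_gt _ t (cs[t]) hc2, ih2, ← hl1]
        have hmain := pvBody_main cs t ht' ((pvLab cs 0).getD t 0 - 1) _ _ ih1 ih3
        refine ⟨hmain.1, ?_, hmain.2.2⟩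
        rw [hmain.2.1, hl2, hl1]
      · rw [if_neg hc1, if_neg hc2] at hl1 hl2
        rw [pvStepB_other _ t (cs[t]) hc1 hc2]
        refine ⟨?_, ?_, ?_⟩
        · rw [ih1]
          exact pvMapCongr _ _ _ (fun k _ => ((pvGB_frozen (pvLab cs 0) t (Or.inl hl1)) k).symm)
        · rw [ih2, hl2]
        · intro d
          rw [ih3 d, pvPend_succ_zero (pvLab cs 0) t hl1 d]

lemma pvGA_final (L : List Int) (t k : Nat) (ht : L.length ≤ t) (hk : k < L.length) :
    pvGA L t k = pvFpr L k := by
  cases h : pvPr L k with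
  | none => rw [pvGA_eq_none L t k h]; simp only [pvFpr, h]
  | some j =>
    rw [pvGA_eq_some L t k j h, if_pos (by omega)]
    simp only [pvFpr, h]

lemma pvGB_final (L : List Int) (t k : Nat) (ht : L.length ≤ t) (hk : k < L.length) :
    pvGB L t k = pvFpr L k := by
  cases h : pvPr L k with
  | none => rw [pvGB_eq_none L t k h]; simp only [pvFpr, h]
  | some j =>
    have hin := pvPr_inv L k j h
    rw [pvGB_eq_some L t k j h, if_pos (by omega)]
    simp only [pvFpr, h]

lemma pvA_eq (const : String) :
    pairedConstraint const = (List.range const.toList.length).map (pvFpr (pvLab const.toList 0)) := by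
  have hlen : (pvLab const.toList 0).length = const.toList.length := pvLab_length _ 0
  simp only [pairedConstraint]
  rw [pvPhase1 const.toList 0 []]
  simp only [List.nil_append]
  rw [pvAInv (pvLab const.toList 0) (pvLab const.toList 0).length le_rfl]
  show (List.range (pvLab const.toList 0).length).map (pvGA (pvLab const.toList 0) (pvLab const.toList 0).length) = _
  rw [pvMapCongr (pvGA (pvLab const.toList 0) (pvLab const.toList 0).length)
        (pvFpr (pvLab const.toList 0)) (pvLab const.toList 0).length
        (fun k hk => pvGA_final (pvLab const.toList 0) (pvLab const.toList 0).length k le_rfl hk),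
      hlen]

lemma pvB_eq (const : String) :
    pairedConstraint_alt const = (List.range const.toList.length).map (pvFpr (pvLab const.toList 0)) := by
  have hlen : (pvLab const.toList 0).length = const.toList.length := pvLab_length _ 0
  simp only [pairedConstraint_alt]
  have htl : const.toList.zipIdx.take const.toList.length = const.toList.zipIdx :=
    List.take_of_length_le (le_of_eq (by simp))
  rw [← htl, (pvBInv const.toList const.toList.length le_rfl).1]
  exact pvMapCongr _ _ _ (fun k hk =>
    pvGB_final (pvLab const.toList 0) const.toList.length k (le_of_eq hlen) (by omega))

-- ===== VERDICT (by name: the statement is the Claim_ definition above) =====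
theorem pairedConstraint_spec : Claim_equal_pairedConstraint := by
  intro const _
  unfold Spec_pairedConstraint
  rw [pvA_eq, pvB_eq]
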